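-- pv_equiv track=rewrite | github.com/gitandy/PyADIF-File | examples/gen_big_adi.py | gen_call
-- ===== SOURCE A (Python) =====
-- import string
--
-- def gen_call(calls: int = 1000, cnt_prefix: str = '', anc_suffix: str = ''):
--     gen_calls = 0
--     cnt_prefix = cnt_prefix.upper() + '/' if cnt_prefix else ''
--     anc_suffix = '/' + anc_suffix.upper() if anc_suffix else ''
--     for fpc in string.ascii_uppercase:  # First prefix char
--         for spc in string.ascii_uppercase:  # Second prefix char
--             for nr in range(10):  # Number
--                 for fsc in string.ascii_uppercase:  # First suffix char
--                     for ssc in string.ascii_uppercase:  # Second suffix char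
--                         gen_calls += 1
--                         if gen_calls > calls:
--                             return
--                         else:
--                             yield f'{cnt_prefix}{fpc}{spc}{nr}{fsc}{ssc}{anc_suffix}'
-- ===== SOURCE B (Python) =====
-- import string
--
--
-- def gen_call(calls: int = 1000, cnt_prefix: str = '', anc_suffix: str = ''):
--     # Single index loop with divmod decoding instead of five nested loops.
--     cnt_prefix = cnt_prefix.upper() + '/' if cnt_prefix else ''
--     anc_suffix = '/' + anc_suffix.upper() if anc_suffix else ''
--     u = string.ascii_uppercase
--     total = 26 * 26 * 10 * 26 * 26
--     n = max(0, min(calls, total))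
--     for i in range(n):
--         rest, ssc = divmod(i, 26)
--         rest, fsc = divmod(rest, 26)
--         rest, nr = divmod(rest, 10)
--         fpc, spc = divmod(rest, 26)
--         yield f'{cnt_prefix}{u[fpc]}{u[spc]}{nr}{u[fsc]}{u[ssc]}{anc_suffix}'
-- ===== Notes on version B (the rewrite author's own statement) =====
-- stated objective: alternative
-- what changed: Replaces the five nested character loops (with a running counter and early return) by a single loop over indices 0..min(calls, 26*26*10*26*26), decoding each index into the five callsign positions by successive divmod.
import Mathlib
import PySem

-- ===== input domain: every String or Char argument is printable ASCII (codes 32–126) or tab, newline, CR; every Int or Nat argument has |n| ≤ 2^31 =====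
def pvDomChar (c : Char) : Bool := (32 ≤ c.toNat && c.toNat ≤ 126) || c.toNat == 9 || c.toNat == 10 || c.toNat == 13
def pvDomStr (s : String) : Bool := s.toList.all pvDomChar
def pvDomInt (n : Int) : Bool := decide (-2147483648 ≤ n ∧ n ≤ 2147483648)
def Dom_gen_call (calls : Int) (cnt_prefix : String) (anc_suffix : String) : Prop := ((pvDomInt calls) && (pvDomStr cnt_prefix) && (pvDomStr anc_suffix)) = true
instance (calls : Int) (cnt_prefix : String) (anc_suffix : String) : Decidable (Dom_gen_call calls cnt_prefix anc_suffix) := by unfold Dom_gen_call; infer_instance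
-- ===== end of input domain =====

-- B replaces A's five nested loops (running counter + early return) by one index loop with
-- successive-divmod decoding; alternative decomposition, same cost. A is a generator in
-- Python; the equivalence proved here is about the list of yielded values.

-- ===== PORT A =====
-- pvUp mirrors the module constant string.ascii_uppercase (as a char list, per PySem convention).
def pvUp : List Char := "ABCDEFGHIJKLMNOPQRSTUVWXYZ".toList

-- pvOut extracts the yielded list from the loop state (gen_calls, yielded, returned?).
def pvOut : Int × List String × Bool → List String
  | (_, acc, _) => acc

-- Literal port of A: five nested loops, the counter gen_calls (st.1), the yielded list (st.2.1)
-- and a flag (st.2.2) modelling Python's early `return`; the f-string is the char-list concatenation,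
-- with the cnt_prefix/anc_suffix reassignments of A inlined at their use site.
def gen_call (calls : Int) (cnt_prefix : String) (anc_suffix : String) : List String :=
  pvOut (pvUp.foldl (fun st fpc =>
    pvUp.foldl (fun st spc =>
      (PySem.List.pyRange 0 10 1).foldl (fun st nr =>
        pvUp.foldl (fun st fsc =>
          pvUp.foldl (fun st ssc =>
            if st.2.2 then st
            else if st.1 + 1 > calls then (st.1 + 1, st.2.1, true)
            else (st.1 + 1, st.2.1 ++ [String.ofList ((if cnt_prefix.toList ≠ [] then PySem.Chars.upper cnt_prefix.toList ++ ['/'] else []) ++ [fpc] ++ [spc] ++ PySem.Int.toChars nr ++ [fsc] ++ [ssc] ++ (if anc_suffix.toList ≠ [] then '/' :: PySem.Chars.upper anc_suffix.toList else []))], false))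
          st) st) st) st) ((0 : Int), ([] : List String), false))

-- ===== PORT B =====
-- Literal port of Source B: one loop over range(max(0, min(calls, total))), successive divmod decoding.
-- u[fpc] etc. index with values always in 0..25 (so Python cannot raise); ported as List.getD,
-- exact on these in-range indices.
def gen_call_alt (calls : Int) (cnt_prefix : String) (anc_suffix : String) : List String :=
  (PySem.List.pyRange 0 (max 0 (min calls (26 * 26 * 10 * 26 * 26))) 1).map (fun i =>
    let ssc := PySem.Int.mod i 26
    let r1 := PySem.Int.floordiv i 26
    let fsc := PySem.Int.mod r1 26
    let r2 := PySem.Int.floordiv r1 26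
    let nr := PySem.Int.mod r2 10
    let r3 := PySem.Int.floordiv r2 10
    let spc := PySem.Int.mod r3 26
    let fpc := PySem.Int.floordiv r3 26
    String.ofList ((if cnt_prefix.toList ≠ [] then PySem.Chars.upper cnt_prefix.toList ++ ['/'] else []) ++ [pvUp.getD fpc.toNat ' '] ++ [pvUp.getD spc.toNat ' '] ++ PySem.Int.toChars nr ++ [pvUp.getD fsc.toNat ' '] ++ [pvUp.getD ssc.toNat ' '] ++ (if anc_suffix.toList ≠ [] then '/' :: PySem.Chars.upper anc_suffix.toList else [])))


-- ===== PRECONDITION & SPEC =====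
def Spec_gen_call (calls : Int) (cnt_prefix : String) (anc_suffix : String) (out : List String) : Prop := out = gen_call_alt calls cnt_prefix anc_suffix
instance (calls : Int) (cnt_prefix : String) (anc_suffix : String) (out : List String) : Decidable (Spec_gen_call calls cnt_prefix anc_suffix out) := by unfold Spec_gen_call; infer_instance

-- ===== CLAIM (what is proved, stated in full; the proofs are below) =====
def Claim_equal_gen_call : Prop := ∀ (calls : Int) (cnt_prefix : String) (anc_suffix : String), Dom_gen_call calls cnt_prefix anc_suffix → Spec_gen_call calls cnt_prefix anc_suffix (gen_call calls cnt_prefix anc_suffix)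

-- ===== LEMMAS AND PROOFS =====

def pvStep (calls : Int) (f : α → String) (st : Int × List String × Bool) (x : α) : Int × List String × Bool :=
  if st.2.2 then st
  else if st.1 + 1 > calls then (st.1 + 1, st.2.1, true)
  else (st.1 + 1, st.2.1 ++ [f x], false)

def pvRender (cp sf : List Char) (q : Char × Char × Int × Char × Char) : String :=
  String.ofList (cp ++ [q.1] ++ [q.2.1] ++ PySem.Int.toChars q.2.2.1 ++ [q.2.2.2.1] ++ [q.2.2.2.2] ++ sf)

def pvDecode (i : Nat) : Char × Char × Int × Char × Char :=
  (pvUp.getD (i / 26 / 26 / 10 / 26) ' ', pvUp.getD (i / 26 / 26 / 10 % 26) ' ',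
   Int.ofNat (i / 26 / 26 % 10), pvUp.getD (i / 26 % 26) ' ', pvUp.getD (i % 26) ' ')

theorem pvStep_stopped (calls : Int) (f : α → String) (l : List α) (g : Int) (acc : List String) :
    l.foldl (pvStep calls f) (g, acc, true) = (g, acc, true) := by
  induction l with
  | nil => rfl
  | cons x xs ih => simpa [pvStep] using ih

theorem pvRun (calls : Int) (f : α → String) (l : List α) :
    ∀ (g : Int) (acc : List String),
      pvOut (l.foldl (pvStep calls f) (g, acc, false))
        = acc ++ (l.take (calls - g).toNat).map f := by
  induction l with
  | nil => intro g acc; simp [pvOut]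
  | cons x xs ih =>
    intro g acc
    by_cases h : g + 1 > calls
    · have h0 : (calls - g).toNat = 0 := by omega
      simp [List.foldl_cons, pvStep, h, pvStep_stopped, h0, pvOut]
    · have h1 : (calls - g).toNat = (calls - (g + 1)).toNat + 1 := by omega
      simp [List.foldl_cons, pvStep, h, h1, ih (g + 1) (acc ++ [f x])]

theorem pvSelfIndex (l : List Char) (d : Char) :
    (List.range l.length).map (fun i => l.getD i d) = l := by
  apply List.ext_getElem
  · simp
  · intro i h1 h2; simp [List.getD_eq_getElem?_getD, List.getElem?_eq_getElem h2]

theorem pvFlatRange (m k : Nat) (f : Nat → Nat → γ) :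
    (List.range m).flatMap (fun a => (List.range k).map (f a))
      = (List.range (m * k)).map (fun i => f (i / k) (i % k)) := by
  induction m with
  | zero => simp
  | succ m ih =>
    rcases Nat.eq_zero_or_pos k with hk | hk
    · subst hk; simp
    · rw [List.range_succ, List.flatMap_append, ih, Nat.succ_mul, List.range_add,
        List.map_append, List.flatMap_singleton, List.map_map]
      congr 1
      apply List.map_congr_left
      intro j hj
      have hj' : j < k := List.mem_range.mp hj
      have hd : (m * k + j) / k = m := by
        rw [Nat.mul_comm m k, Nat.mul_add_div hk, Nat.div_eq_of_lt hj', Nat.add_zero]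
      have hm : (m * k + j) % k = j := by
        rw [Nat.mul_add_mod_self_right, Nat.mod_eq_of_lt hj']
      simp [Function.comp, hd, hm]

theorem pvA_norm (calls : Int) (cnt_prefix anc_suffix : String) :
    gen_call calls cnt_prefix anc_suffix
      = (List.range (min calls.toNat 4569760)).map (fun i =>
          pvRender (if cnt_prefix.toList ≠ [] then PySem.Chars.upper cnt_prefix.toList ++ ['/'] else [])
                   (if anc_suffix.toList ≠ [] then '/' :: PySem.Chars.upper anc_suffix.toList else [])
                   (pvDecode i)) := by
  rw [gen_call.eq_def]
  have hfold :
      List.foldl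
        (pvStep calls (pvRender (if cnt_prefix.toList ≠ [] then PySem.Chars.upper cnt_prefix.toList ++ ['/'] else []) (if anc_suffix.toList ≠ [] then '/' :: PySem.Chars.upper anc_suffix.toList else [])))
        ((0 : Int), ([] : List String), false)
        (List.flatMap (fun fpc => List.flatMap (fun spc => List.flatMap (fun nr => List.flatMap (fun fsc => List.map (fun ssc => (fpc, spc, nr, fsc, ssc)) pvUp) pvUp) (PySem.List.pyRange 0 10 1)) pvUp) pvUp)
      = (pvUp.foldl (fun st fpc =>
          pvUp.foldl (fun st spc =>
            (PySem.List.pyRange 0 10 1).foldl (fun st nr =>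
              pvUp.foldl (fun st fsc =>
                pvUp.foldl (fun st ssc =>
                  if st.2.2 then st
                  else if st.1 + 1 > calls then (st.1 + 1, st.2.1, true)
                  else (st.1 + 1, st.2.1 ++ [String.ofList ((if cnt_prefix.toList ≠ [] then PySem.Chars.upper cnt_prefix.toList ++ ['/'] else []) ++ [fpc] ++ [spc] ++ PySem.Int.toChars nr ++ [fsc] ++ [ssc] ++ (if anc_suffix.toList ≠ [] then '/' :: PySem.Chars.upper anc_suffix.toList else []))], false))
                st) st) st) st) ((0 : Int), ([] : List String), false)) := by
    simp only [List.foldl_flatMap, List.foldl_map, pvStep, pvRender]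
  rw [← hfold, pvRun]
  have hup : pvUp = (List.range 26).map (fun d => pvUp.getD d ' ') := (pvSelfIndex pvUp ' ').symm
  have hR10 : PySem.List.pyRange 0 10 1 = (List.range 10).map Int.ofNat := by
    simpa using PySem.List.pyRange_zero_natCast 10
  rw [hR10]
  conv_lhs => rw [hup]
  simp only [List.flatMap_map, List.map_map, Function.comp_def, pvFlatRange]
  rw [Int.sub_zero, ← List.map_take, List.take_range]
  rw [List.nil_append]
  norm_num
  intro i _ _
  have e1 : i / 175760 = i / 26 / 26 / 10 / 26 := by omega
  have e2 : i % 175760 / 6760 = i / 26 / 26 / 10 % 26 := by omega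
  have e3 : ((i : Int) % 6760 / 676) = Int.ofNat (i / 26 / 26 % 10) := by
    have h : i % 6760 / 676 = i / 26 / 26 % 10 := by omega
    rw [Int.ofNat_eq_natCast, ← h]
    push_cast
    omega
  have e4 : i % 676 / 26 = i / 26 % 26 := by omega
  simp [pvRender, pvDecode, List.getD, e1, e2, e3, e4]

theorem pvB_norm (calls : Int) (cnt_prefix anc_suffix : String) :
    gen_call_alt calls cnt_prefix anc_suffix
      = (List.range (min calls.toNat 4569760)).map (fun i =>
          pvRender (if cnt_prefix.toList ≠ [] then PySem.Chars.upper cnt_prefix.toList ++ ['/'] else [])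
                   (if anc_suffix.toList ≠ [] then '/' :: PySem.Chars.upper anc_suffix.toList else [])
                   (pvDecode i)) := by
  unfold gen_call_alt
  have hn : max 0 (min calls (26 * 26 * 10 * 26 * 26)) = ((min calls.toNat 4569760 : Nat) : Int) := by
    omega
  rw [hn, PySem.List.pyRange_zero_natCast, List.map_map]
  apply List.map_congr_left
  intro i _
  simp only [Function.comp]
  simp only [PySem.Int.mod_eq_emod_of_pos (by norm_num : (0:Int) < 26),
    PySem.Int.mod_eq_emod_of_pos (by norm_num : (0:Int) < 10),
    PySem.Int.floordiv_eq_ediv_of_pos (by norm_num : (0:Int) < 26),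
    PySem.Int.floordiv_eq_ediv_of_pos (by norm_num : (0:Int) < 10)]
  have h_ssc : ((i:Int) % 26).toNat = i % 26 := by omega
  have h_fsc : ((i:Int) / 26 % 26).toNat = i / 26 % 26 := by omega
  have h_nr : ((i:Int) / 26 / 26 % 10) = Int.ofNat (i / 26 / 26 % 10) := by
    rw [Int.ofNat_eq_natCast]; push_cast; ring
  have h_spc : ((i:Int) / 26 / 26 / 10 % 26).toNat = i / 26 / 26 / 10 % 26 := by omega
  have h_fpc : ((i:Int) / 26 / 26 / 10 / 26).toNat = i / 26 / 26 / 10 / 26 := by omega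
  simp only [pvRender, pvDecode]
  rw [h_ssc, h_fsc, h_nr, h_spc, h_fpc]


-- ===== VERDICT (by name: the statement is the Claim_ definition above) =====
theorem gen_call_spec : Claim_equal_gen_call := by
  intro calls cnt_prefix anc_suffix _
  exact (pvA_norm calls cnt_prefix anc_suffix).trans (pvB_norm calls cnt_prefix anc_suffix).symm
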